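-- pv_equiv track=rewrite | github.com/ArRashid/Project-CCNA | Scripts/VLSM Script.py | htbit
-- ===== SOURCE A (Python) =====
-- def htbit(host_num):
--     y = 0
--     z = 0
--     while host_num > z:
--         x = pow(2, y)
--         y += 1
--         z = x - 2
--     return y - 1
-- ===== SOURCE B (Python) =====
-- def htbit(host_num):
--     if host_num <= 0:
--         return -1
--     return (host_num + 1).bit_length()
-- ===== Notes on version B (the rewrite author's own statement) =====
-- stated objective: idiomatic
-- what changed: Replaces the doubling while-loop with a guard for host_num <= 0 plus the closed form (host_num + 1).bit_length(), the smallest e with 2^e >= host_num + 2.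
import Mathlib
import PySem

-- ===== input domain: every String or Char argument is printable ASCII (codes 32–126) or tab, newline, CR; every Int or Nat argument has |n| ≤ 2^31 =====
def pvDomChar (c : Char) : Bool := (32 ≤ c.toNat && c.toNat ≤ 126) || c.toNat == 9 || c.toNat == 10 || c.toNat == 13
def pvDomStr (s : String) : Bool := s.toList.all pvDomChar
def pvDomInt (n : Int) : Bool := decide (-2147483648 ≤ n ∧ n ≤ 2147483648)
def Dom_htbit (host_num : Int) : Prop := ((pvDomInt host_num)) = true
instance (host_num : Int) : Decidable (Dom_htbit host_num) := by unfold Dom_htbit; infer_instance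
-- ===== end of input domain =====

-- B replaces A's doubling while-loop with a guard plus an integer bit-length closed form (idiomatic).

-- ===== PORT A =====
-- the while-loop, fueled; htbit supplies fuel host_num.toNat + 3, proved sufficient below
def htbitLoop (host_num : Int) : Nat → Nat → Int → Int
  | 0, y, _ => (y : Int) - 1
  | fuel + 1, y, z =>
    if host_num > z then
      let x : Int := 2 ^ y
      htbitLoop host_num fuel (y + 1) (x - 2)
    else (y : Int) - 1

def htbit (host_num : Int) : Int := htbitLoop host_num (host_num.toNat + 3) 0 0

-- ===== PORT B =====
-- (host_num + 1).bit_length() ported as Nat.size (equal on nonnegative ints)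
def htbit_alt (host_num : Int) : Int :=
  if host_num ≤ 0 then -1 else ((host_num + 1).toNat.size : Int)

-- ===== PRECONDITION & SPEC =====
def Spec_htbit (host_num : Int) (out : Int) : Prop := out = htbit_alt host_num
instance (host_num : Int) (out : Int) : Decidable (Spec_htbit host_num out) := by unfold Spec_htbit; infer_instance

-- ===== CLAIM (what is proved, stated in full; the proofs are below) =====
def Claim_equal_htbit : Prop := ∀ (host_num : Int), Dom_htbit host_num → Spec_htbit host_num (htbit host_num)

-- ===== LEMMAS AND PROOFS =====

-- loop invariant: from state (y, 2^(y-1)-2) with 1 ≤ y ≤ t+1 and enough fuel, the loop returns t,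
-- where t = Nat.size (n+1) and host_num = n ≥ 1.
theorem htbitLoop_inv (n : Nat) :
    ∀ fuel y : Nat, 1 ≤ y → y ≤ Nat.size (n + 1) + 1 → Nat.size (n + 1) + 2 ≤ fuel + y →
      htbitLoop (n : Int) fuel y ((2 : Int) ^ (y - 1) - 2) = (Nat.size (n + 1) : Int) := by
  intro fuel
  induction fuel with
  | zero => intro y h1 h2 h3; omega
  | succ f ih =>
    intro y h1 h2 h3
    have hguard : ((n : Int) > (2 : Int) ^ (y - 1) - 2) ↔ 2 ^ (y - 1) ≤ n + 1 := by
      rw [show ((2 : Int) ^ (y - 1)) = ((2 ^ (y - 1) : Nat) : Int) from by push_cast; ring]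
      omega
    by_cases hc : 2 ^ (y - 1) ≤ n + 1
    · -- guard true: y - 1 < size (n+1), so y ≤ size (n+1); loop continues
      have hlt : y - 1 < Nat.size (n + 1) := Nat.lt_size.mpr hc
      have hstep : htbitLoop (n : Int) (f + 1) y ((2 : Int) ^ (y - 1) - 2)
          = htbitLoop (n : Int) f (y + 1) ((2 : Int) ^ y - 2) := by
        simp only [htbitLoop]
        rw [if_pos (hguard.mpr hc)]
      rw [hstep]
      have : (2 : Int) ^ y = (2 : Int) ^ ((y + 1) - 1) := by norm_num
      rw [this]
      exact ih (y + 1) (by omega) (by omega) (by omega)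
    · -- guard false: size (n+1) ≤ y - 1, with y ≤ size(n+1)+1 gives y - 1 = size (n+1)
      have hge : Nat.size (n + 1) ≤ y - 1 := by
        by_contra h
        exact hc (Nat.lt_size.mp (by omega))
      have hy : y = Nat.size (n + 1) + 1 := by omega
      simp only [htbitLoop]
      rw [if_neg (fun h => hc (hguard.mp h))]
      omega

theorem size_le_succ (n : Nat) : Nat.size (n + 1) ≤ n + 1 :=
  Nat.size_le.mpr (Nat.lt_two_pow_self)

-- ===== VERDICT (by name: the statement is the Claim_ definition above) =====
theorem htbit_spec : Claim_equal_htbit := by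
  intro host_num _
  unfold Spec_htbit htbit htbit_alt
  by_cases h : host_num ≤ 0
  · -- first guard fails immediately
    simp only [htbitLoop]
    rw [if_neg (by omega), if_pos h]
    norm_num
  · -- host_num = n ≥ 1
    rw [not_le] at h
    obtain ⟨n, rfl⟩ : ∃ n : Nat, host_num = (n : Int) :=
      ⟨host_num.toNat, (Int.toNat_of_nonneg (by omega)).symm⟩
    have hn : 1 ≤ n := by exact_mod_cast h
    rw [if_neg (by omega)]
    have htoNat : ((n : Int) + 1).toNat = n + 1 := by omega
    rw [htoNat]
    have hfuel : (n : Int).toNat = n := by omega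
    -- first iteration: guard n > 0 true, state becomes (1, 2^0 - 2)
    have h0 : htbitLoop (n : Int) (n + 3) 0 0
        = htbitLoop (n : Int) (n + 2) 1 ((2 : Int) ^ 0 - 2) := by
      simp only [htbitLoop]
      rw [if_pos (by exact_mod_cast h)]
    rw [show ((n : Int).toNat + 3) = n + 3 from by omega, h0]
    have := htbitLoop_inv n (n + 2) 1 (by omega) (by omega)
      (by have := size_le_succ n; omega)
    simpa using this
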